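-- pv_equiv track=rewrite | github.com/shabtai/jai | prompts.py | extract_dockerfile
-- ===== SOURCE A (Python) =====
-- def extract_dockerfile(content: str) -> str:
--     """Extract Dockerfile from LLM response, handling markdown code blocks."""
--     if not isinstance(content, str):
--         return content
--
--     lines = content.split("\n")
--
--     # Find the Dockerfile code block (between ``` markers)
--     in_dockerfile_block = False
--     dockerfile_lines = []
--     found_block = False
--
--     for line in lines:
--         # Check for opening code block marker
--         if line.strip().startswith("```"):
--             if not found_block:  # First code block found
--                 in_dockerfile_block = True
--                 found_block = True
--                 # Skip the opening marker and any language specifier (e.g., ```dockerfile)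
--                 continue
--             else:
--                 # Closing code block marker
--                 in_dockerfile_block = False
--                 break
--
--         # Collect lines within the code block
--         if in_dockerfile_block:
--             dockerfile_lines.append(line)
--
--     # If we found a code block, return its content
--     if dockerfile_lines:
--         return "\n".join(dockerfile_lines).strip()
--
--     # Fallback: if no code blocks found, try the old method
--     if content.startswith("```"):
--         lines = [l for l in lines if not l.startswith("```")]
--         return "\n".join(lines).strip()
--
--     return content
-- ===== SOURCE B (Python) =====
-- def extract_dockerfile(content: str) -> str:
--     """Extract Dockerfile from LLM response, handling markdown code blocks."""
--     if not isinstance(content, str):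
--         return content
--
--     lines = content.split("\n")
--
--     # Find the first fence line and, after it, the closing fence (if any)
--     i = next((k for k, l in enumerate(lines) if l.strip().startswith("```")), None)
--     if i is not None:
--         rest = lines[i + 1:]
--         j = next((k for k, l in enumerate(rest) if l.strip().startswith("```")), None)
--         block = rest[:j] if j is not None else rest
--         if block:
--             return "\n".join(block).strip()
--
--     # Fallback: no (non-empty) code block found
--     if content.startswith("```"):
--         return "\n".join(l for l in lines if not l.startswith("```")).strip()
--
--     return content
-- ===== Notes on version B (the rewrite author's own statement) =====
-- stated objective: simpler
-- what changed: Replaces A's stateful scan (in_block/found_block flags with a break) by finding the index of the first fence line and of the next fence after it, then slicing the block out; fence tests and fallback kept byte-for-byte.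
import Mathlib
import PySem

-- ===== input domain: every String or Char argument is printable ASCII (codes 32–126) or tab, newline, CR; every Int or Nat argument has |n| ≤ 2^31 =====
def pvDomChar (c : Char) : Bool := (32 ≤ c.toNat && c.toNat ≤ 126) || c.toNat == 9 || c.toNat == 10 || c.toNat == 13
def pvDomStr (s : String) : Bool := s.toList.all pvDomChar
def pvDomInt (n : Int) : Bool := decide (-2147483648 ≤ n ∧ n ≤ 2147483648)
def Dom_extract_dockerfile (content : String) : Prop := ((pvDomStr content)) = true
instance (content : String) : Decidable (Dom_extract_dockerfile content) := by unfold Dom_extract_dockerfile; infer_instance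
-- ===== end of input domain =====

-- B replaces A's four-variable stateful scan (in_block/found_block flags with a break)
-- by a plain index search: find the first fence line, then the next fence after it,
-- and slice the block out — objective: simpler decomposition, same cost.

-- ===== PORT A =====
-- A's for-loop with `break`: state (in_block, acc, found_block); returns acc (dockerfile_lines).
def pvLoopA : List String → Bool → List String → Bool → List String
  | [], _, acc, _ => acc
  | l :: rest, inb, acc, found =>
    if PySem.Str.startswith (PySem.Str.strip l) "```" then
      if !found then pvLoopA rest true acc true
      else acc  -- break
    else
      if inb then pvLoopA rest inb (acc ++ [l]) found
      else pvLoopA rest inb acc found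

def extract_dockerfile (content : String) : String :=
  let lines := (PySem.Str.split? content "\n").getD []
  let dockerfile_lines := pvLoopA lines false [] false
  if dockerfile_lines ≠ [] then
    PySem.Str.strip (PySem.Str.join "\n" dockerfile_lines)
  else if PySem.Str.startswith content "```" then
    PySem.Str.strip (PySem.Str.join "\n" (lines.filter (fun l => !PySem.Str.startswith l "```")))
  else content

-- ===== PORT B =====
def extract_dockerfile_alt (content : String) : String :=
  let lines := (PySem.Str.split? content "\n").getD []
  let blk : List String :=
    match lines.findIdx? (fun l => PySem.Str.startswith (PySem.Str.strip l) "```") with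
    | none => []
    | some i =>
      let rest := lines.drop (i + 1)
      match rest.findIdx? (fun l => PySem.Str.startswith (PySem.Str.strip l) "```") with
      | some j => rest.take j
      | none => rest
  if blk ≠ [] then
    PySem.Str.strip (PySem.Str.join "\n" blk)
  else if PySem.Str.startswith content "```" then
    PySem.Str.strip (PySem.Str.join "\n" (lines.filter (fun l => !PySem.Str.startswith l "```")))
  else content

-- ===== PRECONDITION & SPEC =====
def Spec_extract_dockerfile (content : String) (out : String) : Prop := out = extract_dockerfile_alt content
instance (content : String) (out : String) : Decidable (Spec_extract_dockerfile content out) := by unfold Spec_extract_dockerfile; infer_instance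

-- ===== CLAIM (what is proved, stated in full; the proofs are below) =====
def Claim_equal_extract_dockerfile : Prop := ∀ (content : String), Dom_extract_dockerfile content → Spec_extract_dockerfile content (extract_dockerfile content)

-- ===== LEMMAS AND PROOFS =====

-- Inside the block (in_block = found = true), A collects lines up to the next fence.
theorem pvLoopA_inside (rest : List String) : ∀ acc : List String,
    pvLoopA rest true acc true
      = acc ++ rest.takeWhile (fun l => !PySem.Str.startswith (PySem.Str.strip l) "```") := by
  induction rest with
  | nil => intro acc; simp [pvLoopA]
  | cons l rest ih =>
    intro acc
    by_cases h : PySem.Str.startswith (PySem.Str.strip l) "```" = true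
    all_goals simp at h
    · simp [pvLoopA, h, List.takeWhile_cons]
    · simp [pvLoopA, h, ih]

-- Taking up to the first index where p holds is takeWhile (!p).
theorem take_findIdx?_eq_takeWhile (p : String → Bool) (xs : List String) :
    (match xs.findIdx? p with
     | some j => xs.take j
     | none => xs)
      = xs.takeWhile (fun x => !p x) := by
  induction xs with
  | nil => simp
  | cons x xs ih =>
    by_cases h : p x = true
    · simp [List.findIdx?_cons, h]
    · simp only [Bool.not_eq_true] at h
      simp only [List.findIdx?_cons, h, List.takeWhile_cons]
      cases hfi : xs.findIdx? p with
      | none => simpa [hfi] using congrArg (List.cons x) (by simpa [hfi] using ih)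
      | some j => simpa [hfi] using congrArg (List.cons x) (by simpa [hfi] using ih)

-- A's whole loop equals B's find-then-slice computation of the block.
theorem pvLoopA_eq_blkB (lines : List String) :
    pvLoopA lines false [] false
      = (match lines.findIdx? (fun l => PySem.Str.startswith (PySem.Str.strip l) "```") with
         | none => ([] : List String)
         | some i =>
           match (lines.drop (i + 1)).findIdx? (fun l => PySem.Str.startswith (PySem.Str.strip l) "```") with
           | some j => (lines.drop (i + 1)).take j
           | none => lines.drop (i + 1)) := by
  induction lines with
  | nil => simp [pvLoopA]
  | cons l rest ih =>
    by_cases h : PySem.Str.startswith (PySem.Str.strip l) "```" = true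
    · simp only [pvLoopA, h, if_true, List.findIdx?_cons, List.drop_succ_cons]
      rw [pvLoopA_inside]
      simpa using (take_findIdx?_eq_takeWhile (fun l => PySem.Str.startswith (PySem.Str.strip l) "```") rest).symm
    · simp only [Bool.not_eq_true] at h
      simp only [pvLoopA, h, if_false, Bool.false_eq_true, List.findIdx?_cons]
      rw [ih]
      cases hfi : rest.findIdx? (fun l => PySem.Str.startswith (PySem.Str.strip l) "```") with
      | none => simp
      | some i => simp

-- ===== VERDICT (by name: the statement is the Claim_ definition above) =====
theorem extract_dockerfile_spec : Claim_equal_extract_dockerfile := by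
  intro content _
  unfold Spec_extract_dockerfile extract_dockerfile extract_dockerfile_alt
  simp only [pvLoopA_eq_blkB]
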